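-- pv_equiv track=rewrite | github.com/wyk18703232953/myResearch | codeComplex/data/onlyCode/python/nlogn/python_nlogn_0201.py | solve
-- ===== SOURCE A (Python) =====
-- def check(k, b, T):
-- 	c = [e for e in b if e[0] >= k]
--
-- 	if len(c) < k:
-- 		return False, None
--
-- 	first_k_probs = c[:k]
-- 	s = sum([e[1] for e in first_k_probs])
--
-- 	if s > T:
-- 		return False, None
--
-- 	return True, first_k_probs
--
-- def solve(n, T, a, t):
-- 	b = []
--
-- 	for i in range(n):
-- 		b.append((a[i], t[i], i + 1))
--
-- 	b.sort(key=lambda x: x[1])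
--
-- 	low, high = 0, n
-- 	result = 0
-- 	final_probs = []
--
-- 	while low <= high:
-- 		mid = (low + high) // 2
--
-- 		(possible, probs) = check(mid, b, T)
-- 		if possible:
-- 			result, final_probs = mid, probs
-- 			low = mid + 1
-- 		else:
-- 			high = mid - 1
--
-- 	return (result, [e[2] for e in final_probs])
-- ===== SOURCE B (Python) =====
-- def solve(n, T, a, t):
--     b = sorted(((a[i], t[i], i + 1) for i in range(n)), key=lambda x: x[1])
--     for k in range(n, 0, -1):
--         c = [e for e in b if e[0] >= k]
--         if len(c) >= k and sum(e[1] for e in c[:k]) <= T: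
--             return (k, [e[2] for e in c[:k]])
--     return (0, [])
-- ===== Notes on version B (the rewrite author's own statement) =====
-- stated objective: simpler
-- what changed: The binary search with mutable result/final_probs state and a separate check helper is replaced by a direct descending linear scan over k that returns the first (largest) feasible k, correct because feasibility is monotone in k when times are nonnegative.
-- outside the precondition, e.g. on solve(1, -2, [5], [-3]): A returns (0, []), B returns (1, [1]); on solve(5, -3, [6, 1, 1, 7, 5], [-2, 6, -4, 4, 7]): A returns (0, []), B returns (1, [3])
import Mathlib
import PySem

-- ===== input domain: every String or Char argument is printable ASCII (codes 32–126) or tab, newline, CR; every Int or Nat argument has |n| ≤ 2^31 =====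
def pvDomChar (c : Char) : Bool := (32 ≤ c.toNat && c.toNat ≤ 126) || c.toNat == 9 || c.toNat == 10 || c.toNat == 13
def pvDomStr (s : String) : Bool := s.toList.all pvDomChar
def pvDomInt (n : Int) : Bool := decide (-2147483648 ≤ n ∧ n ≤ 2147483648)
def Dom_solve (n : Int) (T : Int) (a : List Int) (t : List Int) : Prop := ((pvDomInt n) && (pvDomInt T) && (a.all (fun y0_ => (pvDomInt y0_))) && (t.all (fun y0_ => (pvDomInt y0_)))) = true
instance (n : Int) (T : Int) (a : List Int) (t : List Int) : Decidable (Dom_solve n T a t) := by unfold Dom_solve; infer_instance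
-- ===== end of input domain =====

-- B replaces A's binary search (mutable result/final_probs state) by a direct descending
-- linear scan returning the first (largest) feasible k; equivalence holds because the
-- feasibility predicate is monotone in k when the times are nonnegative (Pre_).

-- ===== PORT A =====
def checkA (k : Int) (b : List (Int × Int × Int)) (T : Int) : Bool × Option (List (Int × Int × Int)) :=
  let c := b.filter (fun e => decide (e.1 ≥ k))
  if (c.length : Int) < k then (false, none)
  else
    let first_k_probs := PySem.List.slice c none (some k)
    let s := (first_k_probs.map (fun e => e.2.1)).sum
    if s > T then (false, none)
    else (true, some first_k_probs)

def solveLoop (b : List (Int × Int × Int)) (T : Int) (low high result : Int)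
    (finalProbs : List (Int × Int × Int)) : Int × List (Int × Int × Int) :=
  if h : low ≤ high then
    let mid := PySem.Int.floordiv (low + high) 2
    let pr := checkA mid b T
    if pr.1 then solveLoop b T (mid + 1) high mid (pr.2.getD [])
    else solveLoop b T low (mid - 1) result finalProbs
  else (result, finalProbs)
termination_by (high + 1 - low).toNat
decreasing_by
  · have hb := PySem.Int.floordiv_two_mid_bounds h; omega
  · have hb := PySem.Int.floordiv_two_mid_bounds h; omega

def solve (n : Int) (T : Int) (a : List Int) (t : List Int) : Int × List Int :=
  let b := (PySem.List.pyRange 0 n 1).foldl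
    (fun acc i => acc ++ [(PySem.List.pyGetD a i 0, PySem.List.pyGetD t i 0, i + 1)]) []
  let bs := PySem.List.sorted b (fun x => x.2.1) false
  let p := solveLoop bs T 0 n 0 []
  (p.1, p.2.map (fun e => e.2.2))

-- ===== PORT B =====
def altScan (b : List (Int × Int × Int)) (T : Int) (k : Int) : Int × List Int :=
  if h : 1 ≤ k then
    let c := b.filter (fun e => decide (e.1 ≥ k))
    if k ≤ (c.length : Int) ∧
        ((PySem.List.slice c none (some k)).map (fun e => e.2.1)).sum ≤ T then
      (k, (PySem.List.slice c none (some k)).map (fun e => e.2.2))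
    else altScan b T (k - 1)
  else (0, [])
termination_by k.toNat
decreasing_by omega

def solve_alt (n : Int) (T : Int) (a : List Int) (t : List Int) : Int × List Int :=
  let bs := PySem.List.sorted
    ((PySem.List.pyRange 0 n 1).map
      (fun i => (PySem.List.pyGetD a i 0, PySem.List.pyGetD t i 0, i + 1)))
    (fun x => x.2.1) false
  altScan bs T n

-- ===== PRECONDITION & SPEC =====
-- Pre_ requires n within the lengths of a and t (otherwise A raises IndexError) and the
-- first n times nonnegative: with a negative time the feasibility predicate is not
-- monotone in k, so the binary search's pick among feasible k is an accident of probe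
-- order — a corner no statement of the problem specifies.
def Pre_solve (n : Int) (T : Int) (a : List Int) (t : List Int) : Prop :=
  n ≤ (a.length : Int) ∧ n ≤ (t.length : Int) ∧ ∀ x ∈ t.take n.toNat, 0 ≤ x
instance (n : Int) (T : Int) (a : List Int) (t : List Int) : Decidable (Pre_solve n T a t) := by
  unfold Pre_solve; infer_instance

def pvWitness_solve : Int × Int × List Int × List Int := (3, 5, [2, 2, 1], [1, 2, 3])

def Spec_solve (n : Int) (T : Int) (a : List Int) (t : List Int) (out : Int × List Int) : Prop :=
  out = solve_alt n T a t
instance (n : Int) (T : Int) (a : List Int) (t : List Int) (out : Int × List Int) :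
    Decidable (Spec_solve n T a t out) := by unfold Spec_solve; infer_instance

-- ===== CLAIM (what is proved, stated in full; the proofs are below) =====
def Claim_equal_solve : Prop := ∀ (n : Int) (T : Int) (a : List Int) (t : List Int),
  Dom_solve n T a t → Pre_solve n T a t → Spec_solve n T a t (solve n T a t)

-- ===== LEMMAS AND PROOFS =====

-- the candidate set, its k cheapest, and the feasibility predicate both ports test
def cListP (b : List (Int × Int × Int)) (k : Int) : List (Int × Int × Int) :=
  b.filter (fun e => decide (e.1 ≥ k))

def probsP (b : List (Int × Int × Int)) (k : Int) : List (Int × Int × Int) :=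
  PySem.List.slice (cListP b k) none (some k)

abbrev FeasP (b : List (Int × Int × Int)) (T : Int) (k : Int) : Prop :=
  k ≤ ((cListP b k).length : Int) ∧ ((probsP b k).map (fun e => e.2.1)).sum ≤ T

-- the common specification: out.1 is the largest feasible k (or 0), out.2 its indices
def PSpec (n : Int) (b : List (Int × Int × Int)) (T : Int) (out : Int × List Int) : Prop :=
  (∀ j, out.1 < j → j ≤ n → ¬ FeasP b T j) ∧
  ((out.1 = 0 ∧ out.2 = []) ∨
    (0 < out.1 ∧ out.1 ≤ n ∧ FeasP b T out.1 ∧ out.2 = (probsP b out.1).map (fun e => e.2.2)))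

lemma PSpec_unique {n : Int} {b : List (Int × Int × Int)} {T : Int} {o1 o2 : Int × List Int}
    (h1 : PSpec n b T o1) (h2 : PSpec n b T o2) : o1 = o2 := by
  obtain ⟨m1, c1⟩ := h1
  obtain ⟨m2, c2⟩ := h2
  have key : o1.1 = o2.1 := by
    rcases c1 with ⟨z1, -⟩ | ⟨p1, hn1, f1, -⟩ <;> rcases c2 with ⟨z2, -⟩ | ⟨p2, hn2, f2, -⟩
    · omega
    · exact absurd f2 (m1 _ (by omega) hn2)
    · exact absurd f1 (m2 _ (by omega) hn1)
    · rcases lt_trichotomy o1.1 o2.1 with h | h | h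
      · exact absurd f2 (m1 _ h hn2)
      · exact h
      · exact absurd f1 (m2 _ h hn1)
  have key2 : o1.2 = o2.2 := by
    rcases c1 with ⟨z1, e1⟩ | ⟨p1, hn1, f1, e1⟩ <;> rcases c2 with ⟨z2, e2⟩ | ⟨p2, hn2, f2, e2⟩ <;>
      simp [e1, e2, key] <;> omega
  exact Prod.ext key key2

lemma sum_take_le_of_sublist : ∀ {l l' : List Int}, List.Sublist l' l → l.Pairwise (· ≤ ·) →
    ∀ m : Nat, m ≤ l'.length → (l.take m).sum ≤ (l'.take m).sum := by
  intro l l' hs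
  induction hs with
  | slnil => intro _ m hm; match m with | 0 => simp
  | cons a hs ih =>
    rename_i l₁ l₂
    intro hsort m hm
    match m with
    | 0 => simp
    | (mm+1) =>
      have hlen : mm < l₂.length := by
        have := hs.length_le; omega
      have h1 : (l₂.take (mm+1)).sum ≤ (l₁.take (mm+1)).sum :=
        ih (List.Pairwise.of_cons hsort) (mm+1) hm
      have h2 : (l₂.take (mm+1)).sum = (l₂.take mm).sum + l₂[mm] := List.sum_take_succ l₂ mm hlen
      have h3 : a ≤ l₂[mm] := (List.pairwise_cons.mp hsort).1 _ (l₂.getElem_mem hlen)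
      simp only [List.take_succ_cons, List.sum_cons]
      omega
  | cons₂ a hs ih =>
    rename_i l₁ l₂
    intro hsort m hm
    match m with
    | 0 => simp
    | (mm+1) =>
      have := ih (List.Pairwise.of_cons hsort) mm (by simpa using Nat.lt_succ_iff.mp (by simpa using hm))
      simp only [List.take_succ_cons, List.sum_cons]
      omega

lemma sum_take_mono_of_nonneg (l : List Int) (h : ∀ x ∈ l, 0 ≤ x) (m m' : Nat)
    (hmm : m ≤ m') : (l.take m).sum ≤ (l.take m').sum := by
  have hsplit : l.take m' = l.take m ++ (l.drop m).take (m' - m) := by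
    rw [← List.take_add]; congr 1; omega
  rw [hsplit, List.sum_append]
  have : 0 ≤ ((l.drop m).take (m' - m)).sum := by
    apply List.sum_nonneg
    intro x hx
    exact h x (List.mem_of_mem_drop (List.mem_of_mem_take hx))
  omega

lemma feas_mono {b : List (Int × Int × Int)} {T : Int}
    (hsort : b.Pairwise (fun x y => x.2.1 ≤ y.2.1)) (hpos : ∀ e ∈ b, 0 ≤ e.2.1)
    {j k : Int} (h0 : 0 ≤ j) (hjk : j ≤ k) (hk : FeasP b T k) : FeasP b T j := by
  obtain ⟨hk1, hk2⟩ := hk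
  have hsub : List.Sublist (cListP b k) (cListP b j) := by
    apply List.monotone_filter_right
    intro e he
    simp only [decide_eq_true_eq] at he ⊢
    omega
  have hlen : (cListP b k).length ≤ (cListP b j).length := hsub.length_le
  refine ⟨by omega, ?_⟩
  have hslj : probsP b j = (cListP b j).take j.toNat := PySem.List.slice_to _ h0
  have hslk : probsP b k = (cListP b k).take k.toNat := PySem.List.slice_to _ (by omega)
  have hmapj : (probsP b j).map (fun e => e.2.1)
      = ((cListP b j).map (fun e => e.2.1)).take j.toNat := by
    rw [hslj, List.map_take]
  have hmapk : (probsP b k).map (fun e => e.2.1)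
      = ((cListP b k).map (fun e => e.2.1)).take k.toNat := by
    rw [hslk, List.map_take]
  set lj := (cListP b j).map (fun e => e.2.1) with hlj
  set lk := (cListP b k).map (fun e => e.2.1) with hlk
  have hsubm : List.Sublist lk lj := hsub.map _
  have hsortj : lj.Pairwise (· ≤ ·) := by
    rw [hlj, List.pairwise_map]
    exact hsort.filter _
  have hlenk : j.toNat ≤ lk.length := by
    rw [hlk, List.length_map]; omega
  have h1 : (lj.take j.toNat).sum ≤ (lk.take j.toNat).sum :=
    sum_take_le_of_sublist hsubm hsortj j.toNat hlenk
  have h2 : (lk.take j.toNat).sum ≤ (lk.take k.toNat).sum := by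
    apply sum_take_mono_of_nonneg
    · intro x hx
      rw [hlk] at hx
      obtain ⟨e, he, rfl⟩ := List.mem_map.mp hx
      exact hpos e (List.mem_of_mem_filter he)
    · omega
  rw [hmapj]
  rw [hmapk] at hk2
  omega

lemma checkA_spec (b : List (Int × Int × Int)) (T k : Int) :
    checkA k b T = if FeasP b T k then (true, some (probsP b k)) else (false, none) := by
  unfold checkA FeasP probsP cListP
  dsimp only
  split_ifs <;> first | rfl | omega

lemma loop_PSpec {n T : Int} {b : List (Int × Int × Int)}
    (hsort : b.Pairwise (fun x y => x.2.1 ≤ y.2.1)) (hpos : ∀ e ∈ b, 0 ≤ e.2.1) :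
    ∀ (m : Nat) (low high result : Int) (probs : List (Int × Int × Int)),
    (high + 1 - low).toNat ≤ m → 0 ≤ low → high ≤ n →
    (∀ j, high < j → j ≤ n → ¬ FeasP b T j) →
    (∀ j, 0 < j → j < low → FeasP b T j → j ≤ result) →
    ((result = 0 ∧ probs = []) ∨
      (0 < result ∧ result ≤ n ∧ FeasP b T result ∧ probs = probsP b result)) →
    PSpec n b T ((solveLoop b T low high result probs).1,
      (solveLoop b T low high result probs).2.map (fun e => e.2.2)) := by
  intro m
  induction m with
  | zero =>
    intro low high result probs hm h0 hhn H3 H4 H5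
    have hlh : ¬ low ≤ high := by omega
    rw [solveLoop, dif_neg hlh]
    have hres0 : 0 ≤ result := by rcases H5 with ⟨h, -⟩ | ⟨h, -⟩ <;> omega
    constructor
    · intro j hj1 hj2 hfe
      by_cases hjh : j ≤ high
      · exact absurd hfe (fun hfe => by have := H4 j (by omega) (by omega) hfe; omega)
      · exact H3 j (by omega) hj2 hfe
    · rcases H5 with ⟨rz, pz⟩ | ⟨rp, rn, rf, pe⟩
      · exact Or.inl ⟨rz, by simp [pz]⟩
      · exact Or.inr ⟨rp, rn, rf, by rw [pe]⟩
  | succ m ih =>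
    intro low high result probs hm h0 hhn H3 H4 H5
    by_cases hlh : low ≤ high
    · rw [solveLoop, dif_pos hlh]
      have hmid := PySem.Int.floordiv_two_mid_bounds hlh
      set mid := PySem.Int.floordiv (low + high) 2 with hmiddef
      dsimp only
      rw [checkA_spec]
      by_cases hf : FeasP b T mid
      · rw [if_pos hf]
        simp only [Option.getD_some]
        apply ih (mid + 1) high mid (probsP b mid) (by omega) (by omega) hhn H3
        · intro j hj0 hjlt hfj; omega
        · by_cases hm0 : mid = 0
          · refine Or.inl ⟨hm0, ?_⟩
            rw [hm0]
            unfold probsP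
            rw [PySem.List.slice_to _ le_rfl]
            simp
          · exact Or.inr ⟨by omega, by omega, hf, rfl⟩
      · rw [if_neg hf]
        apply ih low (mid - 1) result probs (by omega) h0 (by omega)
        · intro j hj hjn hfj
          by_cases hjh : j ≤ high
          · exact hf (feas_mono hsort hpos (by omega) (by omega : mid ≤ j) hfj)
          · exact H3 j (by omega) hjn hfj
        · exact H4
        · exact H5
    · rw [solveLoop, dif_neg hlh]
      have hres0 : 0 ≤ result := by rcases H5 with ⟨h, -⟩ | ⟨h, -⟩ <;> omega
      constructor
      · intro j hj1 hj2 hfe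
        by_cases hjh : j ≤ high
        · exact absurd hfe (fun hfe => by have := H4 j (by omega) (by omega) hfe; omega)
        · exact H3 j (by omega) hj2 hfe
      · rcases H5 with ⟨rz, pz⟩ | ⟨rp, rn, rf, pe⟩
        · exact Or.inl ⟨rz, by simp [pz]⟩
        · exact Or.inr ⟨rp, rn, rf, by rw [pe]⟩

lemma scan_PSpec {n T : Int} {b : List (Int × Int × Int)} :
    ∀ (m : Nat) (k : Int), k.toNat ≤ m → k ≤ n →
    (∀ j, k < j → j ≤ n → ¬ FeasP b T j) →
    PSpec n b T (altScan b T k) := by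
  intro m
  induction m with
  | zero =>
    intro k hk hkn H
    have h1 : ¬ 1 ≤ k := by omega
    rw [altScan, dif_neg h1]
    exact ⟨fun j hj hjn => H j (by omega) hjn, Or.inl ⟨rfl, rfl⟩⟩
  | succ m ih =>
    intro k hk hkn H
    by_cases h1 : 1 ≤ k
    · rw [altScan, dif_pos h1]
      dsimp only
      split_ifs with hc
      · have hfk : FeasP b T k := hc
        exact ⟨H, Or.inr ⟨by omega, hkn, hfk, rfl⟩⟩
      · have hnf : ¬ FeasP b T k := hc
        apply ih (k - 1) (by omega) (by omega)
        intro j hj hjn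
        by_cases hjk : j = k
        · subst hjk; exact hnf
        · exact H j (by omega) hjn
    · rw [altScan, dif_neg h1]
      exact ⟨fun j hj hjn => H j (by omega) hjn, Or.inl ⟨rfl, rfl⟩⟩

-- ===== VERDICT (by name: the statement is the Claim_ definition above) =====
theorem solve_spec : Claim_equal_solve := by
  intro n T a t hDom hPre
  obtain ⟨ha, ht, htt⟩ := hPre
  unfold Spec_solve solve solve_alt
  dsimp only
  rw [PySem.List.foldl_append_singleton_eq_map]
  simp only [List.nil_append]
  set bs := PySem.List.sorted
    ((PySem.List.pyRange 0 n 1).map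
      (fun i => (PySem.List.pyGetD a i 0, PySem.List.pyGetD t i 0, i + 1)))
    (fun x => x.2.1) false with hbs
  have hsort : bs.Pairwise (fun x y => x.2.1 ≤ y.2.1) := PySem.List.sorted_pairwise _ _
  have hpos : ∀ e ∈ bs, 0 ≤ e.2.1 := by
    intro e he
    rw [hbs, PySem.List.mem_sorted] at he
    obtain ⟨i, hi, rfl⟩ := List.mem_map.mp he
    obtain ⟨hi0, hin⟩ := (PySem.List.mem_pyRange_one).mp hi
    dsimp only
    have hlt : i < (t.length : Int) := by omega
    rw [PySem.List.pyGetD_eq_getElem (xs := t) (i := i) (d := 0) hi0 hlt]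
    have hidx : i.toNat < (t.take n.toNat).length := by
      simp only [List.length_take]
      omega
    have heq : t[i.toNat]'(by omega) = (t.take n.toNat)[i.toNat]'hidx := by
      rw [List.getElem_take]
    rw [heq]
    exact htt _ (List.getElem_mem hidx)
  have hA := loop_PSpec (n := n) (T := T) hsort hpos ((n + 1).toNat) 0 n 0 [] (by omega) le_rfl le_rfl
    (fun j hj1 hj2 => absurd hj2 (by omega))
    (fun j hj0 hjl => absurd hjl (by omega))
    (Or.inl ⟨rfl, rfl⟩)
  have hB := scan_PSpec (n := n) (T := T) (b := bs) n.toNat n le_rfl le_rfl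
    (fun j hj hjn => absurd hjn (by omega))
  exact PSpec_unique hA hB
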